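-- pv_equiv track=rewrite | github.com/LemonsInSpace/chi_evaluation | Scripts/parse_crossings_for_spike.py | group_with_gap
-- ===== SOURCE A (Python) =====
-- def group_with_gap(indices, max_gap=5):
--     """
--     Group indices into spike regions.
--     A new spike starts only if the gap between
--     consecutive indices is > max_gap.
--     """
--     if not indices:
--         return []
--
--     indices = sorted(indices)
--     groups = []
--     start = indices[0]
--     prev = indices[0]
--
--     for idx in indices[1:]:
--         if idx - prev <= max_gap:
--             prev = idx
--         else:
--             groups.append((start, prev))
--             start = idx
--             prev = idx
--
--     groups.append((start, prev))
--     return groups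
-- ===== SOURCE B (Python) =====
-- def group_with_gap(indices, max_gap=5):
--     # Staged decomposition: (1) compute the list of cut positions where the
--     # sorted sequence jumps by more than max_gap; (2) read the groups straight
--     # off the boundary lists via zip, with no stateful grouping loop.
--     s = sorted(indices)
--     n = len(s)
--     if n == 0:
--         return []
--     cuts = [i for i in range(1, n) if s[i] - s[i - 1] > max_gap]
--     starts = [0] + cuts
--     ends = cuts + [n]
--     return [(s[a], s[b - 1]) for a, b in zip(starts, ends)]
-- ===== Notes on version B (the rewrite author's own statement) =====
-- stated objective: alternative
-- what changed: A threads (groups, start, prev) accumulators through one stateful fold over the sorted tail and flushes a pending group after the loop; B has no grouping loop at all: it first computes the list of cut positions (indices where the sorted sequence jumps by more than max_gap), then zips the start-boundary list with the end-boundary list and reads each group's endpoints directly off the sorted array.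
import Mathlib
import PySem

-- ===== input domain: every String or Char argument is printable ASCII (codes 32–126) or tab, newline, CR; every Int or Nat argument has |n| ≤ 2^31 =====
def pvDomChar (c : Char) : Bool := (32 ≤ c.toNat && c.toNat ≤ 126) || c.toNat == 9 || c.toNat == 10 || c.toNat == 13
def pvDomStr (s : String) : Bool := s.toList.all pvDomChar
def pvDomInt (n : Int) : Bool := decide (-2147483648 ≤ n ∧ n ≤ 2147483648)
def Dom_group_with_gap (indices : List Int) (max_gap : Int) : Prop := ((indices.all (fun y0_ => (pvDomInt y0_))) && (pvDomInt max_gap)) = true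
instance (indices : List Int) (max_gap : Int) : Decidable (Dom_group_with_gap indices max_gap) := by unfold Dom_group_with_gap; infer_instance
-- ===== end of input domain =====

-- B replaces A's stateful fold with (groups, start, prev) accumulators by a staged computation: a cut-position list, then group endpoints read off the sorted array via zip (alternative decomposition, same cost).


-- ===== PORT A =====
-- literal port: early return on empty, sort, fold the tail with (groups, start, prev), flush the pending group at the end
def group_with_gap (indices : List Int) (max_gap : Int) : List (Int × Int) :=
  if indices = [] then []
  else
    match PySem.List.sorted indices (fun x => x) false with
    | [] => []   -- unreachable totality guard: sorted of a nonempty list is nonempty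
    | h :: t =>
      let st := t.foldl
        (fun (s : List (Int × Int) × Int × Int) idx =>
          if idx - s.2.2 ≤ max_gap then (s.1, s.2.1, idx)
          else (s.1 ++ [(s.2.1, s.2.2)], idx, idx))
        ([], h, h)
      st.1 ++ [(st.2.1, st.2.2)]

-- ===== PORT B =====
-- literal port of Source B: sort; if n == 0 return []; cuts = [i for i in range(1, n) if s[i]-s[i-1] > max_gap];
-- starts = [0] + cuts; ends = cuts + [n]; [(s[a], s[b-1]) for a, b in zip(starts, ends)].
-- Every s[·] index here is nonnegative and < n, so PySem.List.pyGetD is exact for Python's s[·].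
def group_with_gap_alt (indices : List Int) (max_gap : Int) : List (Int × Int) :=
  let s := PySem.List.sorted indices (fun x => x) false
  let n : Int := (s.length : Int)
  if n = 0 then []
  else
    let cuts := (PySem.List.pyRange 1 n 1).filter
      (fun i => decide (max_gap < PySem.List.pyGetD s i 0 - PySem.List.pyGetD s (i - 1) 0))
    let starts := (0 : Int) :: cuts
    let ends := cuts ++ [n]
    (starts.zip ends).map (fun p => (PySem.List.pyGetD s p.1 0, PySem.List.pyGetD s (p.2 - 1) 0))

-- ===== PRECONDITION & SPEC =====
def Spec_group_with_gap (indices : List Int) (max_gap : Int) (out : List (Int × Int)) : Prop := out = group_with_gap_alt indices max_gap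
instance (indices : List Int) (max_gap : Int) (out : List (Int × Int)) : Decidable (Spec_group_with_gap indices max_gap out) := by unfold Spec_group_with_gap; infer_instance

-- ===== CLAIM (what is proved, stated in full; the proofs are below) =====
def Claim_equal_group_with_gap : Prop := ∀ (indices : List Int) (max_gap : Int), Dom_group_with_gap indices max_gap → Spec_group_with_gap indices max_gap (group_with_gap indices max_gap)

-- ===== LEMMAS AND PROOFS =====

-- Common proof-side intermediate: peel the first maximal run off the front of a list.
def pvTakeRun (max_gap : Int) (run_end : Int) : List Int → Int × List Int
  | [] => (run_end, [])
  | x :: xs => if x - run_end ≤ max_gap then pvTakeRun max_gap x xs else (run_end, x :: xs)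

theorem pvTakeRun_len (max_gap run_end : Int) (xs : List Int) :
    (pvTakeRun max_gap run_end xs).2.length ≤ xs.length := by
  induction xs generalizing run_end with
  | nil => simp [pvTakeRun]
  | cons x xs ih =>
    simp only [pvTakeRun]
    split
    · exact le_trans (ih x) (Nat.le_succ _)
    · simp

def pvPeel (max_gap : Int) : List Int → List (Int × Int)
  | [] => []
  | h :: t =>
    let r := pvTakeRun max_gap h t
    (h, r.1) :: pvPeel max_gap r.2
termination_by s => s.length
decreasing_by
  simpa using Nat.lt_succ_of_le (pvTakeRun_len max_gap h t)

-- run-end index: advance j while j+1 < n and s[j+1] - s[j] <= max_gap (proof-side)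
def pvInner (s : List Int) (max_gap : Int) (n j : Nat) : Nat :=
  if j + 1 < n ∧ s.getD (j + 1) 0 - s.getD j 0 ≤ max_gap then pvInner s max_gap n (j + 1) else j
termination_by n - j

theorem pvInner_ge (s : List Int) (max_gap : Int) (n j : Nat) :
    j ≤ pvInner s max_gap n j := by
  generalize hk : n - j = k
  induction k using Nat.strong_induction_on generalizing j with
  | _ k ih =>
    unfold pvInner
    split
    · rename_i hc
      subst hk
      exact le_trans (Nat.le_succ j) (ih (n - (j+1)) (by omega) (j+1) rfl)
    · exact le_refl j

theorem pvInner_lt (s : List Int) (max_gap : Int) (n j : Nat) (hj : j < n) :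
    pvInner s max_gap n j < n := by
  generalize hk : n - j = k
  induction k using Nat.strong_induction_on generalizing j with
  | _ k ih =>
    unfold pvInner
    split
    · rename_i hc
      subst hk
      exact ih (n - (j+1)) (by omega) (j+1) hc.1 rfl
    · exact hj

-- at the run end, the advance condition fails
theorem pvInner_stop (s : List Int) (max_gap : Int) (n j : Nat) :
    ¬ (pvInner s max_gap n j + 1 < n ∧
        s.getD (pvInner s max_gap n j + 1) 0 - s.getD (pvInner s max_gap n j) 0 ≤ max_gap) := by
  generalize hk : n - j = k
  induction k using Nat.strong_induction_on generalizing j with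
  | _ k ih =>
    rw [pvInner]
    split
    · rename_i hc
      subst hk
      exact ih (n - (j+1)) (by omega) (j+1) rfl
    · rename_i hc
      exact hc

-- pvInner computes exactly what pvTakeRun computes on the dropped suffix
theorem pvInner_takeRun (s : List Int) (max_gap : Int) (j : Nat) (hj : j < s.length) :
    pvTakeRun max_gap (s.getD j 0) (s.drop (j + 1)) =
      (s.getD (pvInner s max_gap s.length j) 0, s.drop (pvInner s max_gap s.length j + 1)) := by
  generalize hk : s.length - j = k
  induction k using Nat.strong_induction_on generalizing j with
  | _ k ih =>
    rw [pvInner]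
    split
    · rename_i hc
      have hd : s.drop (j + 1) = s[j+1] :: s.drop (j + 2) := List.drop_eq_getElem_cons hc.1
      rw [hd, pvTakeRun]
      have hg : s.getD (j+1) 0 = s[j+1] := List.getD_eq_getElem s 0 hc.1
      rw [if_pos (by rw [← hg]; exact hc.2)]
      have := ih (s.length - (j+1)) (by omega) (j+1) hc.1 rfl
      rw [hg] at this
      simpa using this
    · rename_i hc
      by_cases h1 : j + 1 < s.length
      · have hd : s.drop (j + 1) = s[j+1] :: s.drop (j + 2) := List.drop_eq_getElem_cons h1
        rw [hd, pvTakeRun]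
        have hg : s.getD (j+1) 0 = s[j+1] := List.getD_eq_getElem s 0 h1
        rw [if_neg (by rw [← hg]; intro hle; exact hc ⟨h1, hle⟩), ← hd]
      · have hd : s.drop (j + 1) = [] := List.drop_eq_nil_of_le (by omega)
        rw [hd, pvTakeRun]

-- Nat-level cut positions after index i: k in (i, n) with s[k] - s[k-1] > max_gap
def pvCuts (s : List Int) (max_gap : Int) (i : Nat) : List Nat :=
  (List.range' (i + 1) (s.length - (i + 1))).filter
    (fun k => decide (max_gap < s.getD k 0 - s.getD (k - 1) 0))

-- Nat-level reading of zip([0]+cuts, cuts+[n]) mapped to endpoint pairs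
def pvPairs (s : List Int) (i : Nat) : List Nat → List (Int × Int)
  | [] => [(s.getD i 0, s.getD (s.length - 1) 0)]
  | c :: cs => (s.getD i 0, s.getD (c - 1) 0) :: pvPairs s c cs

-- no cut position inside a run: cuts after i = cuts after the run end
theorem pvCuts_inner (s : List Int) (max_gap : Int) (j : Nat) :
    pvCuts s max_gap j = pvCuts s max_gap (pvInner s max_gap s.length j) := by
  generalize hk : s.length - j = k
  induction k using Nat.strong_induction_on generalizing j with
  | _ k ih =>
    rw [pvInner]
    split
    · rename_i hc
      have step : pvCuts s max_gap j = pvCuts s max_gap (j + 1) := by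
        unfold pvCuts
        have hr : List.range' (j + 1) (s.length - (j + 1)) =
            (j + 1) :: List.range' (j + 2) (s.length - (j + 2)) := by
          have h1 : s.length - (j + 1) = (s.length - (j + 2)) + 1 := by omega
          rw [h1, List.range'_succ]
        rw [hr, List.filter_cons]
        rw [if_neg (by simpa using not_lt.mpr hc.2)]
      rw [step]
      subst hk
      exact ih (s.length - (j+1)) (by omega) (j+1) rfl
    · rfl

-- at the run end: either no cut remains, or the next position is a cut
theorem pvCuts_at_end (s : List Int) (max_gap : Int) (e : Nat)
    (hstop : ¬ (e + 1 < s.length ∧ s.getD (e + 1) 0 - s.getD e 0 ≤ max_gap)) :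
    pvCuts s max_gap e = if e + 1 < s.length then (e + 1) :: pvCuts s max_gap (e + 1) else [] := by
  unfold pvCuts
  split
  · rename_i h1
    have hr : List.range' (e + 1) (s.length - (e + 1)) =
        (e + 1) :: List.range' (e + 2) (s.length - (e + 2)) := by
      have : s.length - (e + 1) = (s.length - (e + 2)) + 1 := by omega
      rw [this, List.range'_succ]
    rw [hr, List.filter_cons]
    have hcut : max_gap < s.getD (e + 1) 0 - s.getD e 0 := by
      by_contra h
      exact hstop ⟨h1, not_lt.mp h⟩
    rw [if_pos (by simpa using hcut)]
  · rename_i h1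
    have : s.length - (e + 1) = 0 := by omega
    rw [this]
    rfl

-- the peel of the suffix from i is the pair list read off the cuts after i
theorem pvPeel_eq_pairs (s : List Int) (max_gap : Int) (i : Nat) (hi : i < s.length) :
    pvPeel max_gap (s.drop i) = pvPairs s i (pvCuts s max_gap i) := by
  generalize hk : s.length - i = k
  induction k using Nat.strong_induction_on generalizing i with
  | _ k ih =>
    have hd : s.drop i = s[i] :: s.drop (i + 1) := List.drop_eq_getElem_cons hi
    have hg : s.getD i 0 = s[i] := List.getD_eq_getElem s 0 hi
    rw [hd, pvPeel, ← hg, pvInner_takeRun s max_gap i hi]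
    set e := pvInner s max_gap s.length i with he
    have hie : i ≤ e := pvInner_ge s max_gap s.length i
    have hel : e < s.length := pvInner_lt s max_gap s.length i hi
    have hstop := pvInner_stop s max_gap s.length i
    rw [pvCuts_inner s max_gap i, ← he, pvCuts_at_end s max_gap e hstop]
    by_cases h1 : e + 1 < s.length
    · rw [if_pos h1, pvPairs]
      have := ih (s.length - (e + 1)) (by omega) (e + 1) h1 rfl
      simp only [Nat.add_sub_cancel]
      rw [this]
    · rw [if_neg h1, pvPairs]
      have hdrop : s.drop (e + 1) = [] := List.drop_eq_nil_of_le (by omega)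
      have hel1 : e = s.length - 1 := by omega
      rw [hdrop, pvPeel, hel1]

-- A's fold, started with pending run (start, prev) and accumulator acc, equals
-- acc ++ the peel form: close the current run with pvTakeRun, then peel the rest.
theorem foldA_eq_peel (max_gap : Int) (t : List Int) :
    ∀ (acc : List (Int × Int)) (start prev : Int),
      (let st := t.foldl
        (fun (s : List (Int × Int) × Int × Int) idx =>
          if idx - s.2.2 ≤ max_gap then (s.1, s.2.1, idx)
          else (s.1 ++ [(s.2.1, s.2.2)], idx, idx))
        (acc, start, prev)
       st.1 ++ [(st.2.1, st.2.2)])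
      = acc ++ ((start, (pvTakeRun max_gap prev t).1) ::
                pvPeel max_gap (pvTakeRun max_gap prev t).2) := by
  induction t with
  | nil => intro acc start prev; simp [pvTakeRun, pvPeel]
  | cons x xs ih =>
    intro acc start prev
    simp only [List.foldl_cons, pvTakeRun]
    split
    · exact ih acc start x
    · rw [ih (acc ++ [(start, prev)]) x x]
      simp [pvPeel]

-- every cut position is ≥ 1
theorem pvCuts_pos (s : List Int) (max_gap : Int) (i : Nat) :
    ∀ c ∈ pvCuts s max_gap i, 1 ≤ c := by
  intro c hc
  unfold pvCuts at hc
  have := List.mem_range'.mp (List.mem_of_mem_filter hc)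
  omega

-- B's Int-level cut list is the cast of the Nat-level one
theorem cuts_int_eq (s : List Int) (max_gap : Int) :
    (PySem.List.pyRange 1 (s.length : Int) 1).filter
      (fun i => decide (max_gap < PySem.List.pyGetD s i 0 - PySem.List.pyGetD s (i - 1) 0))
    = (pvCuts s max_gap 0).map (fun (k : Nat) => (k : Int)) := by
  rw [PySem.List.pyRange_one]
  unfold pvCuts
  have hrange : ((s.length : Int) - 1).toNat = s.length - 1 := by omega
  rw [hrange]
  have hr' : List.range' (0 + 1) (s.length - (0 + 1)) =
      (List.range (s.length - 1)).map (fun k => 1 + k) := by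
    simp [List.range'_eq_map_range]
  rw [hr', List.filter_map, List.filter_map, List.map_map]
  congr 1
  apply List.filter_congr
  intro k _
  simp only [Function.comp_apply]
  rw [show (1 : Int) + (k : Int) = ((1 + k : Nat) : Int) by push_cast; ring,
      show ((1 + k : Nat) : Int) - 1 = ((k : Nat) : Int) by push_cast; ring,
      PySem.List.pyGetD_natCast, PySem.List.pyGetD_natCast]
  simp

-- zip([a]+cuts, cuts+[n]) mapped to endpoint pairs is pvPairs, for cuts >= 1
theorem zip_pairs_eq (s : List Int) (hs : s ≠ []) (cs : List Nat) :
    ∀ (a : Nat), (∀ c ∈ cs, 1 ≤ c) →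
      ((((a : Int) :: cs.map (fun (k : Nat) => (k : Int))).zip
          (cs.map (fun (k : Nat) => (k : Int)) ++ [(s.length : Int)])).map
        (fun p => (PySem.List.pyGetD s p.1 0, PySem.List.pyGetD s (p.2 - 1) 0)))
      = pvPairs s a cs := by
  induction cs with
  | nil =>
    intro a _
    have hn : 1 ≤ s.length := List.length_pos_iff.mpr hs
    have h1 : (s.length : Int) - 1 = ((s.length - 1 : Nat) : Int) := by omega
    simp only [List.map_nil, List.nil_append, List.zip_cons_cons, List.zip_nil_left,
      List.map_cons, pvPairs, h1, PySem.List.pyGetD_natCast]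
  | cons c cs ih =>
    intro a hpos
    have hc1 : 1 ≤ c := hpos c (List.mem_cons_self)
    have h1 : (c : Int) - 1 = ((c - 1 : Nat) : Int) := by omega
    simp only [List.map_cons, List.cons_append, List.zip_cons_cons, pvPairs, h1,
      PySem.List.pyGetD_natCast]
    exact congrArg _ (ih c (fun x hx => hpos x (List.mem_cons_of_mem _ hx)))

theorem group_with_gap_eq (indices : List Int) (max_gap : Int) :
    group_with_gap indices max_gap = group_with_gap_alt indices max_gap := by
  unfold group_with_gap group_with_gap_alt
  by_cases hnil : indices = []
  · subst hnil
    simp [PySem.List.sorted]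
  · rw [if_neg hnil]
    set s := PySem.List.sorted indices (fun x => x) false with hs
    have hsne : s ≠ [] := by
      rw [hs]
      simpa [PySem.List.sorted_eq_nil_iff] using hnil
    have hn0 : ((s.length : Int)) ≠ 0 := by
      have := List.length_pos_iff.mpr hsne
      omega
    rw [if_neg hn0]
    -- B side: cuts → pvCuts, zip/map → pvPairs
    rw [cuts_int_eq s max_gap]
    have hzip := zip_pairs_eq s hsne (pvCuts s max_gap 0) 0 (pvCuts_pos s max_gap 0)
    simp only [Nat.cast_zero] at hzip
    rw [hzip]
    -- A side: fold → pvPeel of s, then pvPeel → pvPairs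
    have hpeel : pvPeel max_gap s = pvPairs s 0 (pvCuts s max_gap 0) := by
      have := pvPeel_eq_pairs s max_gap 0 (List.length_pos_iff.mpr hsne)
      simpa using this
    match hm : s with
    | [] => exact absurd rfl hsne
    | h :: t =>
      rw [← hpeel, pvPeel]
      simpa using foldA_eq_peel max_gap t [] h h

-- ===== VERDICT (by name: the statement is the Claim_ definition above) =====
theorem group_with_gap_spec : Claim_equal_group_with_gap := by
  intro indices max_gap _
  unfold Spec_group_with_gap
  exact group_with_gap_eq indices max_gap
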